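-- pv_equiv track=rewrite | github.com/ilialecha/Programming_2 | Tests/interleaving.py | interleaving_
-- ===== SOURCE A (Python) =====
-- def interleaving_(number1,number2):
--     interleaving = 0
--     exponent = 0
--     while number1 > 0 or number2 > 0:
--         interleaving += (number2 % 10) * (10**exponent)
--         exponent += 1
--         interleaving += (number1 % 10) * (10**exponent)
--         exponent +=1
--
--         number1 //= 10
--         number2 //= 10
--     return interleaving
-- ===== SOURCE B (Python) =====
-- def interleaving_(number1, number2):
--     def ndigits(n):
--         count = 0
--         while n > 0:
--             count += 1
--             n //= 10
--         return count
--
--     def build(n1, n2, k):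
--         if k == 0:
--             return 0
--         low = (n1 % 10) * 10 + n2 % 10
--         return low + 100 * build(n1 // 10, n2 // 10, k - 1)
--
--     return build(number1, number2, max(ndigits(number1), ndigits(number2)))
-- ===== Notes on version B (the rewrite author's own statement) =====
-- stated objective: alternative
-- what changed: A's single mutating while-loop with a running exponent and 10**exponent per step is replaced by a digit-count phase (per-number while loops) followed by a count-guided recursion that combines one digit pair per level in base 100, with no exponent accumulator.
import Mathlib
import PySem

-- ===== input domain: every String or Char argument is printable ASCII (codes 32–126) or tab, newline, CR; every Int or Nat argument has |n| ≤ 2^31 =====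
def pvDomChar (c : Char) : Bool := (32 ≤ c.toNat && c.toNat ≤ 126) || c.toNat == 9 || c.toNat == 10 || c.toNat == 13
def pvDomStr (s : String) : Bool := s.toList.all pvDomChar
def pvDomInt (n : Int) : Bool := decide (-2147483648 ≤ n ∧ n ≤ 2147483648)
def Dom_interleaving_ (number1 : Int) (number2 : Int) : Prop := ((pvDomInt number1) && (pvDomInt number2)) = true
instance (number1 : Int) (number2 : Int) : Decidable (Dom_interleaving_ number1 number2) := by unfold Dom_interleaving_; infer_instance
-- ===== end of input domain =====

-- B replaces A's single mutating while-loop (running exponent, 10**exponent each step) by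
-- digit-count helpers plus a count-guided recursion combining digit pairs in base 100 (objective: alternative decomposition).

-- termination helpers for the ports (cited by the decreasing_by proofs)
theorem pvMeasure (n1 n2 : Int) (h : n1 > 0 ∨ n2 > 0) :
    (PySem.Int.floordiv n1 10).toNat + (PySem.Int.floordiv n2 10).toNat < n1.toNat + n2.toNat := by
  rw [PySem.Int.floordiv_eq_ediv_of_pos (show (0:Int) < 10 by norm_num),
      PySem.Int.floordiv_eq_ediv_of_pos (show (0:Int) < 10 by norm_num)]
  omega

theorem pvFdiv10_toNat_lt (n : Int) (h : 0 < n) : (PySem.Int.floordiv n 10).toNat < n.toNat := by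
  rw [PySem.Int.floordiv_eq_ediv_of_pos (by norm_num)]; omega

-- ===== PORT A =====
-- literal port of A's while-loop: state (number1, number2, interleaving, exponent)
def pvLoopA (number1 number2 interleaving : Int) (exponent : Nat) : Int :=
  if number1 > 0 ∨ number2 > 0 then
    pvLoopA (PySem.Int.floordiv number1 10) (PySem.Int.floordiv number2 10)
      (interleaving + PySem.Int.mod number2 10 * 10 ^ exponent
                    + PySem.Int.mod number1 10 * 10 ^ (exponent + 1))
      (exponent + 2)
  else interleaving
termination_by number1.toNat + number2.toNat
decreasing_by
  rename_i h
  exact pvMeasure number1 number2 h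

def interleaving_ (number1 : Int) (number2 : Int) : Int :=
  pvLoopA number1 number2 0 0

-- ===== PORT B =====
-- port of B's ndigits helper: while n > 0: count += 1; n //= 10
def pvNdigitsGo (n count : Int) : Int :=
  if n > 0 then pvNdigitsGo (PySem.Int.floordiv n 10) (count + 1) else count
termination_by n.toNat
decreasing_by exact pvFdiv10_toNat_lt n (by assumption)

-- port of B's build helper: recursion on the remaining digit count k
def pvBuild (n1 n2 k : Int) : Int :=
  if k ≤ 0 then 0
  else PySem.Int.mod n1 10 * 10 + PySem.Int.mod n2 10
       + 100 * pvBuild (PySem.Int.floordiv n1 10) (PySem.Int.floordiv n2 10) (k - 1)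
termination_by k.toNat
decreasing_by omega

def interleaving__alt (number1 : Int) (number2 : Int) : Int :=
  pvBuild number1 number2 (max (pvNdigitsGo number1 0) (pvNdigitsGo number2 0))

-- ===== PRECONDITION & SPEC =====
def Spec_interleaving_ (number1 : Int) (number2 : Int) (out : Int) : Prop := out = interleaving__alt number1 number2
instance (number1 : Int) (number2 : Int) (out : Int) : Decidable (Spec_interleaving_ number1 number2 out) := by unfold Spec_interleaving_; infer_instance

-- ===== CLAIM (what is proved, stated in full; the proofs are below) =====
def Claim_equal_interleaving_ : Prop := ∀ (number1 : Int) (number2 : Int), Dom_interleaving_ number1 number2 → Spec_interleaving_ number1 number2 (interleaving_ number1 number2)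

-- ===== LEMMAS AND PROOFS =====

theorem pvFdiv10_nonpos (n : Int) (h : n ≤ 0) : PySem.Int.floordiv n 10 ≤ 0 := by
  rw [PySem.Int.floordiv_eq_ediv_of_pos (by norm_num)]; omega


-- proof-side core: A's loop computed without accumulator/exponent
def pvF (n1 n2 : Int) : Int :=
  if n1 > 0 ∨ n2 > 0 then
    PySem.Int.mod n2 10 + 10 * PySem.Int.mod n1 10
      + 100 * pvF (PySem.Int.floordiv n1 10) (PySem.Int.floordiv n2 10)
  else 0
termination_by n1.toNat + n2.toNat
decreasing_by
  rename_i h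
  exact pvMeasure n1 n2 h

-- proof-side digit count as a Nat
def pvNd (n : Int) : Nat :=
  if 0 < n then pvNd (PySem.Int.floordiv n 10) + 1 else 0
termination_by n.toNat
decreasing_by exact pvFdiv10_toNat_lt n (by assumption)

theorem pvNd_eq_zero_iff (n : Int) : pvNd n = 0 ↔ n ≤ 0 := by
  rw [pvNd]
  split_ifs with h
  · simp; omega
  · simp; omega

theorem pvNd_fdiv (n : Int) : pvNd (PySem.Int.floordiv n 10) = pvNd n - 1 := by
  by_cases h : n ≤ 0
  · have h' := pvFdiv10_nonpos n h
    rw [(pvNd_eq_zero_iff _).mpr h', (pvNd_eq_zero_iff _).mpr h]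
  · have hp : 0 < n := by omega
    conv_rhs => rw [pvNd]
    simp [hp]

theorem pvNdigitsGo_eq (n c : Int) : pvNdigitsGo n c = c + (pvNd n : Int) := by
  induction n, c using pvNdigitsGo.induct with
  | case1 n c h ih =>
      rw [pvNdigitsGo, if_pos h, ih]
      conv_rhs => rw [pvNd, if_pos h]
      push_cast; ring
  | case2 n c h =>
      rw [pvNdigitsGo, if_neg h]
      rw [(pvNd_eq_zero_iff n).mpr (by omega)]
      simp

theorem pvLoopA_eq (n1 n2 acc : Int) (exp : Nat) :
    pvLoopA n1 n2 acc exp = acc + 10 ^ exp * pvF n1 n2 := by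
  induction n1, n2, acc, exp using pvLoopA.induct with
  | case1 n1 n2 acc exp h ih =>
      rw [pvLoopA, if_pos h, ih]
      conv_rhs => rw [pvF, if_pos h]
      ring_nf
  | case2 n1 n2 acc exp h =>
      rw [pvLoopA, if_neg h]
      rw [pvF, if_neg h]
      ring

theorem pvBuild_eq (L : Nat) : ∀ n1 n2 : Int, max (pvNd n1) (pvNd n2) = L →
    pvBuild n1 n2 (L : Int) = pvF n1 n2 := by
  induction L with
  | zero =>
      intro n1 n2 h
      have h1 : n1 ≤ 0 := (pvNd_eq_zero_iff n1).mp (by omega)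
      have h2 : n2 ≤ 0 := (pvNd_eq_zero_iff n2).mp (by omega)
      rw [pvBuild, if_pos (by norm_num), pvF, if_neg (by omega)]
  | succ L ih =>
      intro n1 n2 h
      have hpos : n1 > 0 ∨ n2 > 0 := by
        by_contra hc
        push Not at hc
        have h1 := (pvNd_eq_zero_iff n1).mpr (by omega)
        have h2 := (pvNd_eq_zero_iff n2).mpr (by omega)
        omega
      have hmax : max (pvNd (PySem.Int.floordiv n1 10)) (pvNd (PySem.Int.floordiv n2 10)) = L := by
        rw [pvNd_fdiv, pvNd_fdiv]; omega
      rw [pvBuild, if_neg (by push_cast; omega)]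
      rw [show ((L + 1 : Nat) : Int) - 1 = (L : Int) by push_cast; ring]
      rw [ih _ _ hmax]
      conv_rhs => rw [pvF, if_pos hpos]
      ring

-- ===== VERDICT (by name: the statement is the Claim_ definition above) =====
theorem interleaving__spec : Claim_equal_interleaving_ := by
  intro n1 n2 _
  unfold Spec_interleaving_ interleaving_ interleaving__alt
  rw [pvLoopA_eq, pvNdigitsGo_eq, pvNdigitsGo_eq]
  simp only [zero_add]
  rw [show max ((pvNd n1 : Int)) ((pvNd n2 : Int)) = ((max (pvNd n1) (pvNd n2) : Nat) : Int) by
        exact (Nat.cast_max ..).symm]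
  rw [pvBuild_eq (max (pvNd n1) (pvNd n2)) n1 n2 rfl]
  ring
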